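-- pv_equiv track=rewrite | github.com/Wisammad/eye_tracker | basic_eye_tracker.py | get_adjacent_sectors
-- ===== SOURCE A (Python) =====
-- def get_adjacent_sectors(sector):
--     """Return a list of sectors adjacent to the given sector"""
--     sector_grid = [
--         ["TopLeft", "TopCenter", "TopRight"],
--         ["MiddleLeft", "Center", "MiddleRight"],
--         ["BottomLeft", "BottomCenter", "BottomRight"]
--     ]
--
--     # Find position in grid
--     row, col = -1, -1
--     for r, row_sectors in enumerate(sector_grid):
--         if sector in row_sectors:
--             row = r
--             col = row_sectors.index(sector)
--             break
--
--     if row == -1 or col == -1: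
--         return []  # Sector not found
--
--     # Get adjacent sectors
--     adjacent = []
--     for r in range(max(0, row-1), min(3, row+2)):
--         for c in range(max(0, col-1), min(3, col+2)):
--             if r == row and c == col:
--                 continue  # Skip the sector itself
--             adjacent.append(sector_grid[r][c])
--
--     return adjacent
-- ===== SOURCE B (Python) =====
-- # Precomputed adjacency table: one dict lookup instead of a grid search + range loops.
-- ADJACENCY = {
--     "TopLeft": ["TopCenter", "MiddleLeft", "Center"],
--     "TopCenter": ["TopLeft", "TopRight", "MiddleLeft", "Center", "MiddleRight"],
--     "TopRight": ["TopCenter", "Center", "MiddleRight"],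
--     "MiddleLeft": ["TopLeft", "TopCenter", "Center", "BottomLeft", "BottomCenter"],
--     "Center": ["TopLeft", "TopCenter", "TopRight", "MiddleLeft", "MiddleRight",
--                "BottomLeft", "BottomCenter", "BottomRight"],
--     "MiddleRight": ["TopCenter", "TopRight", "Center", "BottomCenter", "BottomRight"],
--     "BottomLeft": ["MiddleLeft", "Center", "BottomCenter"],
--     "BottomCenter": ["MiddleLeft", "Center", "MiddleRight", "BottomLeft", "BottomRight"],
--     "BottomRight": ["Center", "MiddleRight", "BottomCenter"],
-- }
--
-- def get_adjacent_sectors(sector):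
--     """Return a list of sectors adjacent to the given sector"""
--     return list(ADJACENCY.get(sector, []))
-- ===== Notes on version B (the rewrite author's own statement) =====
-- stated objective: simpler
-- what changed: Replaced the grid search plus nested range loops with a single lookup in a precomputed adjacency dict (unknown sectors fall through to []).
import Mathlib
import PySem

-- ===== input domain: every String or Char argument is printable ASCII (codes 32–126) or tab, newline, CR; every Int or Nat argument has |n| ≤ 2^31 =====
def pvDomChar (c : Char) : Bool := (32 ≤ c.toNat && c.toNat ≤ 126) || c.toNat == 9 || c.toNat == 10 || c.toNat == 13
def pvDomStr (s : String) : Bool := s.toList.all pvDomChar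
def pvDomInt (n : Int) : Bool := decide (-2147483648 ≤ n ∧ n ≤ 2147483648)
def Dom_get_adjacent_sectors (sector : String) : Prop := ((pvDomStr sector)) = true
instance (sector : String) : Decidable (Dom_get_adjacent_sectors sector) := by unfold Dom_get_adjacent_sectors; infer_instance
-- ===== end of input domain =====

-- B replaces A's grid search and nested range loops by a single lookup in a
-- precomputed adjacency table (objective: simpler).

-- ===== PORT A =====
def pvSectorGrid : List (List String) :=
  [["TopLeft", "TopCenter", "TopRight"],
   ["MiddleLeft", "Center", "MiddleRight"],
   ["BottomLeft", "BottomCenter", "BottomRight"]]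

-- the 'for r, row_sectors in enumerate(...): if sector in row_sectors: ...; break' loop
def pvFindPos (sector : String) : List (Int × List String) → Int × Int
  | [] => (-1, -1)
  | (r, rowSectors) :: rest =>
      if sector ∈ rowSectors then
        (r, ((PySem.List.index? rowSectors sector).getD 0 : Nat))
      else pvFindPos sector rest

def get_adjacent_sectors (sector : String) : List String :=
  let sector_grid := pvSectorGrid
  let rc := pvFindPos sector (PySem.List.enumerate sector_grid)
  let row := rc.1
  let col := rc.2
  if row = -1 ∨ col = -1 then []
  else
    (PySem.List.pyRange (max 0 (row - 1)) (min 3 (row + 2)) 1).foldl (fun adjacent r =>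
      (PySem.List.pyRange (max 0 (col - 1)) (min 3 (col + 2)) 1).foldl (fun adjacent c =>
        if r = row ∧ c = col then adjacent
        else adjacent ++ [((PySem.List.pyGet? ((PySem.List.pyGet? sector_grid r).getD []) c).getD "")]) adjacent) []

-- ===== PORT B =====
def pvAdjacency : PySem.Dict String (List String) :=
  PySem.Dict.ofList
    [("TopLeft", ["TopCenter", "MiddleLeft", "Center"]),
     ("TopCenter", ["TopLeft", "TopRight", "MiddleLeft", "Center", "MiddleRight"]),
     ("TopRight", ["TopCenter", "Center", "MiddleRight"]),
     ("MiddleLeft", ["TopLeft", "TopCenter", "Center", "BottomLeft", "BottomCenter"]),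
     ("Center", ["TopLeft", "TopCenter", "TopRight", "MiddleLeft", "MiddleRight",
                 "BottomLeft", "BottomCenter", "BottomRight"]),
     ("MiddleRight", ["TopCenter", "TopRight", "Center", "BottomCenter", "BottomRight"]),
     ("BottomLeft", ["MiddleLeft", "Center", "BottomCenter"]),
     ("BottomCenter", ["MiddleLeft", "Center", "MiddleRight", "BottomLeft", "BottomRight"]),
     ("BottomRight", ["Center", "MiddleRight", "BottomCenter"])]

def get_adjacent_sectors_alt (sector : String) : List String :=
  PySem.Dict.getD pvAdjacency sector []

-- ===== PRECONDITION & SPEC =====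
def Spec_get_adjacent_sectors (sector : String) (out : List String) : Prop := out = get_adjacent_sectors_alt sector
instance (sector : String) (out : List String) : Decidable (Spec_get_adjacent_sectors sector out) := by unfold Spec_get_adjacent_sectors; infer_instance

-- ===== CLAIM (what is proved, stated in full; the proofs are below) =====
def Claim_equal_get_adjacent_sectors : Prop := ∀ (sector : String), Dom_get_adjacent_sectors sector → Spec_get_adjacent_sectors sector (get_adjacent_sectors sector)

-- ===== LEMMAS AND PROOFS =====

theorem pvAdjacency_eq : pvAdjacency = PySem.Dict.mk
    [("TopLeft", ["TopCenter", "MiddleLeft", "Center"]),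
     ("TopCenter", ["TopLeft", "TopRight", "MiddleLeft", "Center", "MiddleRight"]),
     ("TopRight", ["TopCenter", "Center", "MiddleRight"]),
     ("MiddleLeft", ["TopLeft", "TopCenter", "Center", "BottomLeft", "BottomCenter"]),
     ("Center", ["TopLeft", "TopCenter", "TopRight", "MiddleLeft", "MiddleRight",
                 "BottomLeft", "BottomCenter", "BottomRight"]),
     ("MiddleRight", ["TopCenter", "TopRight", "Center", "BottomCenter", "BottomRight"]),
     ("BottomLeft", ["MiddleLeft", "Center", "BottomCenter"]),
     ("BottomCenter", ["MiddleLeft", "Center", "MiddleRight", "BottomLeft", "BottomRight"]),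
     ("BottomRight", ["Center", "MiddleRight", "BottomCenter"])] := by decide

-- On any string other than the nine sector names both programs return [].
theorem pv_default (sector : String)
    (h1 : sector ≠ "TopLeft") (h2 : sector ≠ "TopCenter") (h3 : sector ≠ "TopRight")
    (h4 : sector ≠ "MiddleLeft") (h5 : sector ≠ "Center") (h6 : sector ≠ "MiddleRight")
    (h7 : sector ≠ "BottomLeft") (h8 : sector ≠ "BottomCenter") (h9 : sector ≠ "BottomRight") :
    get_adjacent_sectors sector = get_adjacent_sectors_alt sector := by
  rw [get_adjacent_sectors_alt, pvAdjacency_eq]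
  simp [get_adjacent_sectors, pvSectorGrid, pvFindPos, PySem.List.enumerate,
    PySem.Dict.getD, PySem.Dict.get?_mk_cons, PySem.Dict.get?,
    h1, h2, h3, h4, h5, h6, h7, h8, h9, Ne.symm h1, Ne.symm h2, Ne.symm h3, Ne.symm h4,
    Ne.symm h5, Ne.symm h6, Ne.symm h7, Ne.symm h8, Ne.symm h9]

-- ===== VERDICT (by name: the statement is the Claim_ definition above) =====
set_option maxRecDepth 20000 in
theorem get_adjacent_sectors_spec : Claim_equal_get_adjacent_sectors := by
  intro sector _
  unfold Spec_get_adjacent_sectors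
  by_cases h1 : sector = "TopLeft"; · subst h1; decide
  by_cases h2 : sector = "TopCenter"; · subst h2; decide
  by_cases h3 : sector = "TopRight"; · subst h3; decide
  by_cases h4 : sector = "MiddleLeft"; · subst h4; decide
  by_cases h5 : sector = "Center"; · subst h5; decide
  by_cases h6 : sector = "MiddleRight"; · subst h6; decide
  by_cases h7 : sector = "BottomLeft"; · subst h7; decide
  by_cases h8 : sector = "BottomCenter"; · subst h8; decide
  by_cases h9 : sector = "BottomRight"; · subst h9; decide
  exact pv_default sector h1 h2 h3 h4 h5 h6 h7 h8 h9
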